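-- pv_equiv track=rewrite | github.com/asmitaL99/BIOL-7200 | alagwankar3_nwAlign.py | count
-- ===== SOURCE A (Python) =====
-- def count(matchstr):
-- 	cnt = 0
-- 	length = len(matchstr)
-- 	for i in range(length):
-- 		if matchstr[i] =="|":
-- 			cnt+= 1
-- 		else:
-- 			cnt+= -1
-- 	return cnt
-- ===== SOURCE B (Python) =====
-- def count(matchstr):
--     # closed form: matching chars contribute +1, all others -1
--     return 2 * matchstr.count("|") - len(matchstr)
-- ===== Notes on version B (the rewrite author's own statement) =====
-- stated objective: simpler
-- what changed: Replaces the per-character index loop with a branching accumulator by a closed form: twice the number of pipe characters minus the string length, computed with one str.count call.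
import Mathlib
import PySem

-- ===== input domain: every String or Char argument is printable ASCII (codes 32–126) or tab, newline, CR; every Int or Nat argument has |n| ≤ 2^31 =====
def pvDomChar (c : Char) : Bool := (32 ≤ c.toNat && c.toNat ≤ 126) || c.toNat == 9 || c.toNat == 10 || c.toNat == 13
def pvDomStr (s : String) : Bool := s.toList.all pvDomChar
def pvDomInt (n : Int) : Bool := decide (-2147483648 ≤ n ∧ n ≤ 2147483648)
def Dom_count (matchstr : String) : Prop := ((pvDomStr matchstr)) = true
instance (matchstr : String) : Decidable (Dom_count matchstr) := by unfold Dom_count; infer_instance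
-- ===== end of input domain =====

-- B replaces A's per-character ±1 loop by a closed form: twice the pipe-character count minus the length (simpler).

-- ===== PORT A =====
-- literal port: index loop over range(len(matchstr)), ±1 accumulator
def count (matchstr : String) : Int :=
  let cnt : Int := 0
  let length : Int := PySem.Str.len matchstr
  (PySem.List.pyRange 0 length 1).foldl
    (fun cnt i => if PySem.List.pyGetD matchstr.toList i ' ' == '|' then cnt + 1 else cnt + (-1))
    cnt

-- ===== PORT B =====
def count_alt (matchstr : String) : Int :=
  2 * (PySem.Str.count matchstr "|" : Int) - PySem.Str.len matchstr

-- ===== PRECONDITION & SPEC =====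
def Spec_count (matchstr : String) (out : Int) : Prop := out = count_alt matchstr
instance (matchstr : String) (out : Int) : Decidable (Spec_count matchstr out) := by unfold Spec_count; infer_instance

-- ===== CLAIM (what is proved, stated in full; the proofs are below) =====
def Claim_equal_count : Prop := ∀ (matchstr : String), Dom_count matchstr → Spec_count matchstr (count matchstr)

-- ===== LEMMAS AND PROOFS =====

-- Python str.count with a single-character needle counts character occurrences
theorem chars_count_go_singleton (c : Char) (fuel : Nat) (l : List Char) (acc : Nat) :
    PySem.Chars.count.go [c] fuel l acc = acc + (l.take fuel).count c := by
  induction fuel generalizing l acc with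
  | zero => simp [PySem.Chars.count.go]
  | succ n ih =>
    cases l with
    | nil => simp [PySem.Chars.count.go]
    | cons h t =>
      by_cases hc : h = c
      · subst hc
        simp [PySem.Chars.count.go, List.isPrefixOf, ih]
        omega
      · have : List.isPrefixOf [c] (h :: t) = false := by
          simp [List.isPrefixOf]; exact fun hx => absurd hx.symm hc
        simp [PySem.Chars.count.go, this, ih, hc]

theorem chars_count_singleton (c : Char) (s : List Char) :
    PySem.Chars.count s [c] = s.count c := by
  simp [PySem.Chars.count, chars_count_go_singleton]

-- A's ±1 fold in closed form
theorem foldl_pm_one (l : List Char) (a : Int) :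
    l.foldl (fun cnt c => if c == '|' then cnt + 1 else cnt + (-1)) a
      = a + 2 * (l.count '|' : Int) - l.length := by
  induction l generalizing a with
  | nil => simp
  | cons h t ih =>
    rw [List.foldl_cons]
    by_cases hc : h = '|'
    · subst hc
      rw [if_pos (by decide), ih, List.count_cons_self]
      simp only [List.length_cons]; push_cast; ring
    · rw [if_neg (by simpa using hc), ih, List.count_cons_of_ne hc]
      simp only [List.length_cons]; push_cast; ring

-- ===== VERDICT (by name: the statement is the Claim_ definition above) =====
theorem count_spec : Claim_equal_count := by
  intro s _
  unfold Spec_count count count_alt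
  rw [show PySem.Str.count s "|" = s.toList.count '|' from by
        simp [PySem.Str.count, chars_count_singleton]]
  simp only [PySem.Str.len_eq]
  rw [PySem.List.foldl_pyRange_zero_pyGetD' s.toList ' '
        (fun cnt c => if c == '|' then cnt + 1 else cnt + (-1)) 0]
  rw [foldl_pm_one]
  simp
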